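-- pv_equiv track=rewrite | github.com/Nghia03092004/nghia03092004.github.io | project_euler_unified/problem_968/solution.py | stern_brocot_level
-- ===== SOURCE A (Python) =====
-- def stern_brocot_level(level):
--     """Generate all fractions at a given BFS level (0-indexed)."""
--     if level == 0:
--         return [(1, 1)]
--     nodes = [(1, 1)]
--     for _ in range(level):
--         next_nodes = []
--         for a, b in nodes:
--             next_nodes.append((a, a + b))
--             next_nodes.append((a + b, b))
--         nodes = next_nodes
--     return nodes
-- ===== SOURCE B (Python) =====
-- def stern_brocot_level(level):
--     """Generate all fractions at a given BFS level (0-indexed)."""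
--     def rec(a, b, d):
--         if d <= 0:
--             return [(a, b)]
--         return rec(a, a + b, d - 1) + rec(a + b, b, d - 1)
--     return rec(1, 1, level)
-- ===== Notes on version B (the rewrite author's own statement) =====
-- stated objective: alternative
-- what changed: Replaced the level-by-level iterative BFS (rebuilding the whole node list each round) with a recursive DFS-preorder tree traversal whose leaves appear in the same left-to-right order.
import Mathlib
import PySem

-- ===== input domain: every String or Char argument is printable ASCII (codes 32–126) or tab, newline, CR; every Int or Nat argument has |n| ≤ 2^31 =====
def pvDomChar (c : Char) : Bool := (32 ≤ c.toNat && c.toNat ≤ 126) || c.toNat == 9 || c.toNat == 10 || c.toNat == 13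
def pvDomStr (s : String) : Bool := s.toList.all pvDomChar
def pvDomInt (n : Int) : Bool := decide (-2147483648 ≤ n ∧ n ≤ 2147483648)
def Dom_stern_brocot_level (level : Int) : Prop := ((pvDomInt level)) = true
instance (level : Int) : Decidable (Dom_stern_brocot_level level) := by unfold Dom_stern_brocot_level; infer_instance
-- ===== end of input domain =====

-- B replaces A's level-by-level BFS rebuild with a recursive preorder tree traversal (alternative decomposition, same output order).

-- ===== PORT A =====
def stern_brocot_level (level : Int) : List (Int × Int) :=
  if level == 0 then [(1, 1)]
  else
    (PySem.List.pyRange 0 level 1).foldl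
      (fun nodes _ =>
        nodes.foldl
          (fun next_nodes p => next_nodes ++ [(p.1, p.1 + p.2), (p.1 + p.2, p.2)]) [])
      [(1, 1)]

-- ===== PORT B =====
def sbRec (a b d : Int) : List (Int × Int) :=
  if d ≤ 0 then [(a, b)]
  else sbRec a (a + b) (d - 1) ++ sbRec (a + b) b (d - 1)
termination_by d.toNat
decreasing_by all_goals omega

def stern_brocot_level_alt (level : Int) : List (Int × Int) :=
  sbRec 1 1 level

-- ===== PRECONDITION & SPEC =====
def Spec_stern_brocot_level (level : Int) (out : List (Int × Int)) : Prop := out = stern_brocot_level_alt level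
instance (level : Int) (out : List (Int × Int)) : Decidable (Spec_stern_brocot_level level out) := by unfold Spec_stern_brocot_level; infer_instance

-- ===== CLAIM (what is proved, stated in full; the proofs are below) =====
def Claim_equal_stern_brocot_level : Prop := ∀ (level : Int), Dom_stern_brocot_level level → Spec_stern_brocot_level level (stern_brocot_level level)

-- ===== LEMMAS AND PROOFS =====

-- one BFS round, as A's inner foldl computes it
def sbStep (L : List (Int × Int)) : List (Int × Int) :=
  L.foldl (fun next_nodes p => next_nodes ++ [(p.1, p.1 + p.2), (p.1 + p.2, p.2)]) []

theorem sbRec_nonpos (a b d : Int) (h : d ≤ 0) : sbRec a b d = [(a, b)] := by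
  rw [sbRec]; simp [h]

theorem sbRec_natCast_succ (a b : Int) (n : Nat) :
    sbRec a b ((n : Int) + 1) = sbRec a (a + b) n ++ sbRec (a + b) b n := by
  rw [sbRec]
  have h : ¬ ((n : Int) + 1 ≤ 0) := by omega
  simp [h]

theorem sbStep_foldl (L acc : List (Int × Int)) :
    L.foldl (fun next_nodes p => next_nodes ++ [(p.1, p.1 + p.2), (p.1 + p.2, p.2)]) acc
      = acc ++ L.flatMap (fun p => [(p.1, p.1 + p.2), (p.1 + p.2, p.2)]) := by
  induction L generalizing acc with
  | nil => simp
  | cons x xs ih => simp [List.foldl_cons, ih, List.flatMap_cons]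

theorem sbStep_eq (L : List (Int × Int)) :
    sbStep L = L.flatMap (fun p => [(p.1, p.1 + p.2), (p.1 + p.2, p.2)]) := by
  simpa [sbStep] using sbStep_foldl L []

-- n BFS rounds equal flat-mapping the recursive traversal over the frontier
theorem sbStep_iter (n : Nat) (L : List (Int × Int)) :
    (Nat.iterate sbStep n) L = L.flatMap (fun p => sbRec p.1 p.2 (n : Int)) := by
  induction n generalizing L with
  | zero =>
    simp [Function.iterate_zero]
    exact (List.flatMap_singleton' L).symm ▸ by
      simp [sbRec_nonpos _ _ 0 le_rfl]
  | succ n ih =>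
    rw [Function.iterate_succ_apply, ih, sbStep_eq, List.flatMap_assoc]
    refine List.flatMap_congr ?_
    intro p _
    simp only [List.flatMap_cons, List.flatMap_nil, List.append_nil, Nat.cast_succ]
    rw [sbRec_natCast_succ]

-- A's outer foldl over any list is iterating sbStep length-many times
theorem foldl_const_step (l : List Int) (L : List (Int × Int)) :
    l.foldl (fun nodes _ => sbStep nodes) L = (Nat.iterate sbStep l.length) L := by
  induction l generalizing L with
  | nil => simp
  | cons x xs ih => simp [List.foldl_cons, ih, Function.iterate_succ_apply]

-- ===== VERDICT (by name: the statement is the Claim_ definition above) =====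
theorem stern_brocot_level_spec : Claim_equal_stern_brocot_level := by
  intro level _
  unfold Spec_stern_brocot_level stern_brocot_level stern_brocot_level_alt
  by_cases h0 : level = 0
  · simp [h0, sbRec_nonpos 1 1 0 le_rfl]
  · simp only [beq_iff_eq, h0, if_false]
    have := foldl_const_step (PySem.List.pyRange 0 level 1) [(1, 1)]
    rw [show (fun (nodes : List (Int × Int)) (_ : Int) => nodes.foldl
          (fun next_nodes p => next_nodes ++ [(p.1, p.1 + p.2), (p.1 + p.2, p.2)]) [])
        = (fun nodes _ => sbStep nodes) from rfl, this,
      sbStep_iter, PySem.List.length_pyRange_one]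
    simp only [List.flatMap_cons, List.flatMap_nil, List.append_nil]
    by_cases hneg : level ≤ 0
    · rw [show (((level - 0).toNat : Int)) = 0 from by omega,
        sbRec_nonpos 1 1 0 le_rfl, sbRec_nonpos 1 1 level hneg]
    · rw [show (((level - 0).toNat : Int)) = level from by omega]
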